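-- pv_equiv track=rewrite | github.com/CedrickArmel/asrs_reports_cls | src/feature_engineering/nodes.py | encode_cell
-- ===== SOURCE A (Python) =====
-- from typing import List, Union
--
-- def encode_cell(cell: str,
--                 labels: List[str],
--                 include_other: bool = False) -> List[int]:
--     """Encode the multilabels cell such that the cell content is replaced by \
--         a list of same length as labels and containing 0/1.
--
--     Args:
--         cell (str): semicolon separated string of labels.
--         labels (List[str]): actual list of labels to classify to use \
--             to regroup the raw labels in the data.
--         include_other (bool, optional): Whether to include optional "other"\
--               label. Defaults to False.
--
--     Returns:
--         List: Multilabel one-hot encoded list.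
--     """
--
--     cell_anomalies = [item.strip() for item in cell.split(';')]
--     splited_cell_anomalies = {label: 1 if
--                               any(item.startswith(label)
--                                   for item in cell_anomalies)
--                               else 0 for label in labels}
--     if include_other:
--         splited_cell_anomalies['Other'] = 1 if not any(splited_cell_anomalies.
--                                                        values()) else 0
--     encodings = list(splited_cell_anomalies.values())
--     return encodings
-- ===== SOURCE B (Python) =====
-- from typing import List
--
--
-- def encode_cell(cell: str,
--                 labels: List[str],
--                 include_other: bool = False) -> List[int]:
--     """One-hot encode a ';'-separated cell against a list of label prefixes."""
--     maxlen = max(map(len, labels), default=0)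
--     prefixes = set()
--     for item in cell.split(';'):
--         item = item.strip()
--         for k in range(min(len(item), maxlen) + 1):
--             prefixes.add(item[:k])
--     codes = {label: 1 if label in prefixes else 0 for label in labels}
--     if include_other:
--         codes['Other'] = 0 if any(codes.values()) else 1
--     return list(codes.values())
-- ===== Notes on version B (the rewrite author's own statement) =====
-- stated objective: faster
-- what changed: B replaces A's per-label any() scan over all cell items with a hash index built once: every prefix of every cell item goes into a set, so each label is answered by a single O(1) membership test instead of rescanning the items.
import Mathlib
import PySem

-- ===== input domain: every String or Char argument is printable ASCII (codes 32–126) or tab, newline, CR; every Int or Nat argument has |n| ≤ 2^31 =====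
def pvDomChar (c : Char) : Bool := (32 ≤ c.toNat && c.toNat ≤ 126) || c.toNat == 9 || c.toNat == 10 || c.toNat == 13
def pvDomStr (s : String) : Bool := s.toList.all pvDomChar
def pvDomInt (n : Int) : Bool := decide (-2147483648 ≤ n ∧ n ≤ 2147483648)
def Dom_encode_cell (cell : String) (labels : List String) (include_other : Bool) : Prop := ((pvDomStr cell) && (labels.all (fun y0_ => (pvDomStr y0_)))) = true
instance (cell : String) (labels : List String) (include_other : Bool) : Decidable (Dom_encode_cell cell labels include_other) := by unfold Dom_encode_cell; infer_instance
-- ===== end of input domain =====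

-- B builds a hash set of every prefix of every cell item once, so each label is answered by a
-- single membership test instead of A's per-label any() scan over all items; objective: faster.

-- ===== PORT A =====
def encode_cell (cell : String) (labels : List String) (include_other : Bool) : List Int :=
  let cellAnomalies := ((PySem.Str.split? cell ";").getD []).map PySem.Str.strip
  let d := labels.foldl (fun d label =>
      d.insert label (if cellAnomalies.any (fun item => PySem.Str.startswith item label) then (1:Int) else 0))
    PySem.Dict.empty
  let d2 := if include_other then
      d.insert "Other" (if !(d.values.any (fun v => v != 0)) then (1:Int) else 0)
    else d
  d2.values

-- ===== PORT B =====
def encode_cell_alt (cell : String) (labels : List String) (include_other : Bool) : List Int :=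
  let maxlen : Int := PySem.List.maxD (labels.map PySem.Str.len) (fun x => x) 0
  let prefixes : PySem.Set String :=
    ((PySem.Str.split? cell ";").getD []).foldl (fun s item0 =>
        let item := PySem.Str.strip item0
        (PySem.List.pyRange 0 (min (PySem.Str.len item) maxlen + 1) 1).foldl
          (fun s k => PySem.Set.add s (PySem.Str.slice item none (some k))) s)
      PySem.Set.empty
  let codes := labels.foldl (fun d label =>
      d.insert label (if PySem.Set.contains prefixes label then (1:Int) else 0))
    PySem.Dict.empty
  let codes2 := if include_other then
      codes.insert "Other" (if codes.values.any (fun v => v != 0) then (0:Int) else 1)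
    else codes
  codes2.values

-- ===== PRECONDITION & SPEC =====
def Spec_encode_cell (cell : String) (labels : List String) (include_other : Bool) (out : List Int) : Prop := out = encode_cell_alt cell labels include_other
instance (cell : String) (labels : List String) (include_other : Bool) (out : List Int) : Decidable (Spec_encode_cell cell labels include_other out) := by unfold Spec_encode_cell; infer_instance

-- ===== CLAIM (what is proved, stated in full; the proofs are below) =====
def Claim_equal_encode_cell : Prop := ∀ (cell : String) (labels : List String) (include_other : Bool), Dom_encode_cell cell labels include_other → Spec_encode_cell cell labels include_other (encode_cell cell labels include_other)

-- ===== LEMMAS AND PROOFS =====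

-- membership in a fold of set-adds over a list of keys.
lemma mem_foldl_set_add (f : Int → String) :
    ∀ (l : List Int) (s : PySem.Set String) (lab : String),
      lab ∈ l.foldl (fun s k => PySem.Set.add s (f k)) s ↔ lab ∈ s ∨ ∃ k ∈ l, lab = f k := by
  intro l
  induction l with
  | nil => intro s lab; simp
  | cons x xs ih =>
    intro s lab
    simp only [List.foldl_cons, ih, PySem.Set.mem_add, List.mem_cons]
    constructor
    · rintro ((h | h) | ⟨k, hk, hke⟩)
      · exact Or.inl h
      · exact Or.inr ⟨x, Or.inl rfl, h⟩
      · exact Or.inr ⟨k, Or.inr hk, hke⟩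
    · rintro (h | ⟨k, (rfl | hk), hke⟩)
      · exact Or.inl (Or.inl h)
      · exact Or.inl (Or.inr hke)
      · exact Or.inr ⟨k, hk, hke⟩

-- a string is among the slices item[:k], 0 ≤ k ≤ min(len(item), M), iff item starts with it
-- and it is no longer than M.
lemma mem_slices_iff_startswith (M : Int) (item lab : String) :
    (∃ k ∈ PySem.List.pyRange 0 (min (PySem.Str.len item) M + 1) 1,
        lab = PySem.Str.slice item none (some k))
      ↔ (PySem.Str.startswith item lab = true ∧ (lab.toList.length : Int) ≤ M) := by
  have hlen : PySem.Str.len item = (item.toList.length : Int) := by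
    rw [PySem.Str.len_eq, String.length_toList]
  rw [PySem.Str.startswith_eq, PySem.Chars.startswith_iff]
  constructor
  · rintro ⟨k, hk, rfl⟩
    rw [PySem.List.mem_pyRange_one] at hk
    obtain ⟨hk0, hkM⟩ := hk
    have hkn : k ≤ (item.toList.length : Int) := by rw [hlen] at hkM; omega
    have hkM' : k ≤ M := by omega
    have htl : (PySem.Str.slice item none (some k)).toList = item.toList.take k.toNat := by
      rw [PySem.Str.toList_slice, PySem.Chars.slice_eq_listSlice, PySem.List.slice_to _ hk0]
    constructor
    · rw [htl]; exact List.take_prefix _ _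
    · rw [htl, List.length_take]
      have : k.toNat ≤ item.toList.length := by omega
      simp only [String.length_toList]
      omega
  · rintro ⟨h, hM⟩
    refine ⟨(lab.toList.length : Int), ?_, ?_⟩
    · rw [PySem.List.mem_pyRange_one]
      have hle : lab.toList.length ≤ item.toList.length := List.IsPrefix.length_le h
      constructor
      · positivity
      · rw [hlen]; omega
    · refine String.toList_inj.mp ?_
      rw [PySem.Str.toList_slice, PySem.Chars.slice_eq_listSlice,
        PySem.List.slice_to _ (by positivity)]
      simp only [Int.toNat_natCast]
      exact List.prefix_iff_eq_take.mp h

-- membership in B's capped prefix set = some (stripped) cell item starts with the label,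
-- which is no longer than the cap.
lemma mem_prefixes_iff (M : Int) (items : List String) (lab : String) :
    ∀ (s : PySem.Set String),
      lab ∈ items.foldl (fun s item0 =>
          let item := PySem.Str.strip item0
          (PySem.List.pyRange 0 (min (PySem.Str.len item) M + 1) 1).foldl
            (fun s k => PySem.Set.add s (PySem.Str.slice item none (some k))) s) s
        ↔ lab ∈ s ∨ ((∃ item0 ∈ items, PySem.Str.startswith (PySem.Str.strip item0) lab = true)
            ∧ (lab.toList.length : Int) ≤ M) := by
  induction items with
  | nil => intro s; simp
  | cons x xs ih =>
    intro s
    simp only [List.foldl_cons, ih, mem_foldl_set_add, mem_slices_iff_startswith, List.mem_cons]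
    constructor
    · rintro ((h | ⟨h1, h2⟩) | ⟨⟨it, hit, hsw⟩, hM⟩)
      · exact Or.inl h
      · exact Or.inr ⟨⟨x, Or.inl rfl, h1⟩, h2⟩
      · exact Or.inr ⟨⟨it, Or.inr hit, hsw⟩, hM⟩
    · rintro (h | ⟨⟨it, (rfl | hit), hsw⟩, hM⟩)
      · exact Or.inl (Or.inl h)
      · exact Or.inl (Or.inr ⟨hsw, hM⟩)
      · exact Or.inr ⟨⟨it, hit, hsw⟩, hM⟩

-- for a label within the cap, the membership test against B's prefix index computes A's
-- per-label scan of the items.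
lemma contains_prefixes_eq_any (M : Int) (items0 : List String) (lab : String)
    (hcap : (lab.toList.length : Int) ≤ M) :
    PySem.Set.contains (items0.foldl (fun s item0 =>
        let item := PySem.Str.strip item0
        (PySem.List.pyRange 0 (min (PySem.Str.len item) M + 1) 1).foldl
          (fun s k => PySem.Set.add s (PySem.Str.slice item none (some k))) s)
      PySem.Set.empty) lab
      = (items0.map PySem.Str.strip).any (fun item => PySem.Str.startswith item lab) := by
  rcases h : (items0.map PySem.Str.strip).any (fun item => PySem.Str.startswith item lab) with _ | _
  · rw [Bool.eq_false_iff]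
    intro hc
    have hm := (PySem.Set.contains_iff _ _).mp hc
    rw [mem_prefixes_iff] at hm
    rcases hm with hm | ⟨⟨it0, hit0, hsw⟩, _⟩
    · simp [PySem.Set.empty] at hm
    · have : (items0.map PySem.Str.strip).any (fun item => PySem.Str.startswith item lab) = true := by
        rw [List.any_eq_true]
        exact ⟨PySem.Str.strip it0, List.mem_map_of_mem hit0, hsw⟩
      rw [h] at this; exact Bool.false_ne_true this
  · apply (PySem.Set.contains_iff _ _).mpr
    rw [mem_prefixes_iff]
    rw [List.any_eq_true] at h
    obtain ⟨it, hit, hsw⟩ := h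
    rw [List.mem_map] at hit
    obtain ⟨it0, hit0, rfl⟩ := hit
    exact Or.inr ⟨⟨it0, hit0, hsw⟩, hcap⟩

-- ===== VERDICT (by name: the statement is the Claim_ definition above) =====
theorem encode_cell_spec : Claim_equal_encode_cell := by
  intro cell labels io _
  unfold Spec_encode_cell
  simp only [encode_cell, encode_cell_alt]
  set items0 : List String := (PySem.Str.split? cell ";").getD [] with hitems0
  set maxlen : Int := PySem.List.maxD (labels.map PySem.Str.len) (fun x => x) 0 with hmaxlen
  -- the two dict folds coincide: for a label in the list (hence within the cap), B's
  -- membership test computes A's per-label scan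
  have hfold : labels.foldl (fun d label =>
        d.insert label (if PySem.Set.contains (items0.foldl (fun s item0 =>
            let item := PySem.Str.strip item0
            (PySem.List.pyRange 0 (min (PySem.Str.len item) maxlen + 1) 1).foldl
              (fun s k => PySem.Set.add s (PySem.Str.slice item none (some k))) s)
          PySem.Set.empty) label then (1:Int) else 0))
        PySem.Dict.empty
      = labels.foldl (fun d label =>
        d.insert label (if (items0.map PySem.Str.strip).any
            (fun item => PySem.Str.startswith item label) then (1:Int) else 0))
        PySem.Dict.empty := by
    apply PySem.List.foldl_congr_mem
    intro d label hmem
    have hcap : (label.toList.length : Int) ≤ maxlen := by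
      have h1 : PySem.Str.len label ≤ maxlen := by
        rw [hmaxlen]
        exact PySem.List.le_maxD_id _ 0 _ (List.mem_map_of_mem hmem)
      rw [PySem.Str.len_eq, String.length_toList] at h1
      exact h1
    rw [contains_prefixes_eq_any maxlen items0 label hcap]
  rw [hfold]
  set d : PySem.Dict String Int := labels.foldl (fun d label =>
      d.insert label (if (items0.map PySem.Str.strip).any
          (fun item => PySem.Str.startswith item label) then (1:Int) else 0))
    PySem.Dict.empty with hd
  have hov : (if (!d.values.any fun v => v != 0) = true then (1:Int) else 0)
      = (if (d.values.any fun v => v != 0) = true then (0:Int) else 1) := by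
    cases h : (d.values.any fun v => v != 0) <;> rfl
  cases io with
  | false => rfl
  | true => rw [if_pos rfl, if_pos rfl, hov]
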